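-- pv_equiv track=rewrite | github.com/popitsch/rnalib | pygenlib/iterators.py | gt2zyg
-- ===== SOURCE A (Python) =====
-- def gt2zyg(gt) -> (int, int):
--     """
--     Parameters
--     ----------
--     gt genotype
--
--     Returns
--     -------
--     zygosity of GT and a flag if called.
--     zygosity: 2: all called alleles are the same, 1: mixed called alleles, 0: no call
--     call: 0 if no-call or homref, 1 otherwise
--     """
--     dat = gt.split('/') if '/' in gt else gt.split('|')
--     if set(dat) == {'.'}:  # no call
--         return 0, 0
--     dat_clean = [x for x in dat if x != '.']  # drop no-calls
--     if set(dat_clean) == {'0'}:  # homref in all called samples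
--         return 2, 0
--     return 2 if len(set(dat_clean)) == 1 else 1, 1
-- ===== SOURCE B (Python) =====
-- def gt2zyg(gt) -> (int, int):
--     # character-level streaming: no split, no sets; counters decide the result arithmetically
--     sep = '/' if '/' in gt else '|'
--     n_alleles = 0
--     n_dot = 0
--     n_zero = 0
--     first = None
--     n_first = 0
--     cur = []
--     for ch in gt + sep:
--         if ch == sep:
--             a = ''.join(cur)
--             cur = []
--             n_alleles += 1
--             if a == '.':
--                 n_dot += 1
--             else:
--                 if a == '0':
--                     n_zero += 1
--                 if first is None:
--                     first = a
--                 if a == first: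
--                     n_first += 1
--         else:
--             cur.append(ch)
--     if n_dot == n_alleles:
--         return 0, 0
--     if n_zero + n_dot == n_alleles:
--         return 2, 0
--     return (2 if n_first + n_dot == n_alleles else 1), 1
-- ===== Notes on version B (the rewrite author's own statement) =====
-- stated objective: alternative
-- what changed: B never builds the allele list or any set: it streams over the characters of the genotype once, assembling alleles on the fly and maintaining integer counters (alleles, no-calls, refs, occurrences of the first called allele), and classifies arithmetically from the counts.
import Mathlib
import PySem

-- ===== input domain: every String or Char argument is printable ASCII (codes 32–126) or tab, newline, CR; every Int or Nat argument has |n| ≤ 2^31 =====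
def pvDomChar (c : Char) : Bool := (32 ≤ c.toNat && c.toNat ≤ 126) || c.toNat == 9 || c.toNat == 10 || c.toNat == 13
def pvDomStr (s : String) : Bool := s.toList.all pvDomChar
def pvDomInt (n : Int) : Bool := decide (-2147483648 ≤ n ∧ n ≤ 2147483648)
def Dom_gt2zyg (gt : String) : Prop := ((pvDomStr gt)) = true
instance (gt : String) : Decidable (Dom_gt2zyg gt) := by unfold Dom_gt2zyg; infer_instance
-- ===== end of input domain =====

-- B streams over the characters once with integer counters instead of splitting and building sets (alternative algorithm, same cost).

-- ===== PORT A =====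
def gt2zyg (gt : String) : Int × Int :=
  -- the separator literals are nonempty, so Str.split? is always `some`; `.getD []` only unwraps it
  let dat := (if PySem.Str.isIn "/" gt then PySem.Str.split? gt "/" else PySem.Str.split? gt "|").getD []
  if PySem.Set.equal (PySem.Set.ofList dat) (PySem.Set.ofList ["."]) then (0, 0)
  else
    let datClean := dat.filter (fun x => x != ".")
    if PySem.Set.equal (PySem.Set.ofList datClean) (PySem.Set.ofList ["0"]) then (2, 0)
    else ((if PySem.Set.len (PySem.Set.ofList datClean) = 1 then 2 else 1), 1)

-- ===== PORT B =====
-- counter state: (n_alleles, n_dot, n_zero, first, n_first); the sep-branch body of B's loop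
def gt2zygPA (s : Nat × Nat × Nat × Option String × Nat) (a : String) :
    Nat × Nat × Nat × Option String × Nat :=
  match s with
  | (nA, nD, nZ, first, nF) =>
    if a == "." then (nA + 1, nD + 1, nZ, first, nF)
    else
      let nZ' := if a == "0" then nZ + 1 else nZ
      match first with
      | none => (nA + 1, nD, nZ', some a, nF + 1)   -- first := a, then a == first holds
      | some f => (nA + 1, nD, nZ', some f, if a == f then nF + 1 else nF)

-- one character of B's loop: on the separator flush the current allele, otherwise extend it
def gt2zygStep (sep : Char) (s : (Nat × Nat × Nat × Option String × Nat) × List Char)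
    (ch : Char) : (Nat × Nat × Nat × Option String × Nat) × List Char :=
  if ch == sep then (gt2zygPA s.1 (String.ofList s.2), [])
  else (s.1, s.2 ++ [ch])

def gt2zyg_alt (gt : String) : Int × Int :=
  let sep : Char := if PySem.Str.isIn "/" gt then '/' else '|'
  let st := ((gt.toList ++ [sep]).foldl (gt2zygStep sep) ((0, 0, 0, none, 0), [])).1
  match st with
  | (nA, nD, nZ, _, nF) =>
    if nD = nA then (0, 0)
    else if nZ + nD = nA then (2, 0)
    else ((if nF + nD = nA then 2 else 1), 1)

-- ===== PRECONDITION & SPEC =====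
def Spec_gt2zyg (gt : String) (out : Int × Int) : Prop := out = gt2zyg_alt gt
instance (gt : String) (out : Int × Int) : Decidable (Spec_gt2zyg gt out) := by unfold Spec_gt2zyg; infer_instance

-- ===== CLAIM (what is proved, stated in full; the proofs are below) =====
def Claim_equal_gt2zyg : Prop := ∀ (gt : String), Dom_gt2zyg gt → Spec_gt2zyg gt (gt2zyg gt)

-- ===== LEMMAS AND PROOFS =====

-- proof-only: plain structural split of a char list on a single separator char
def splitAux (sep : Char) : List Char → List Char → List (List Char)
  | [], cur => [cur]
  | c :: rest, cur =>
    if c = sep then cur :: splitAux sep rest [] else splitAux sep rest (cur ++ [c])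

lemma splitAux_ne_nil (sep : Char) (l cur : List Char) : splitAux sep l cur ≠ [] := by
  cases l with
  | nil => simp [splitAux]
  | cons c rest =>
    simp only [splitAux]
    split
    · simp
    · exact splitAux_ne_nil sep rest _

-- PySem's fueled splitOn on a one-char separator is splitAux
lemma splitOn_go_single (sep : Char) :
    ∀ (l : List Char) (fuel : Nat), l.length < fuel → ∀ (cur : List Char) (acc : List (List Char)),
      PySem.Chars.splitOn.go [sep] fuel l cur acc = acc.reverse ++ splitAux sep l cur.reverse := by
  intro l
  induction l with
  | nil =>
    intro fuel hf cur acc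
    cases fuel with
    | zero => omega
    | succ n => simp [PySem.Chars.splitOn.go, splitAux]
  | cons c rest ih =>
    intro fuel hf cur acc
    cases fuel with
    | zero => simp at hf
    | succ n =>
      simp only [PySem.Chars.splitOn.go]
      have hpre : ([sep].isPrefixOf (c :: rest)) = (sep == c) := by
        cases h : sep == c <;> simp [List.isPrefixOf, h]
      by_cases hc : sep = c
      · rw [if_pos (by rw [hpre]; simpa using hc)]
        simp only [List.length_cons] at hf
        rw [show List.drop [sep].length (c :: rest) = rest from by simp]
        rw [ih n (by omega) [] (cur.reverse :: acc)]
        simp [splitAux, hc.symm]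
      · rw [if_neg (by rw [hpre]; simpa using hc)]
        simp only [List.length_cons] at hf
        rw [ih n (by omega) (c :: cur) acc]
        have hc' : c ≠ sep := fun h => hc h.symm
        simp [splitAux, hc', List.reverse_cons]

lemma splitOn_single (sep : Char) (l : List Char) :
    PySem.Chars.splitOn l [sep] = splitAux sep l [] := by
  have := splitOn_go_single sep l (l.length + 1) (by omega) [] []
  simpa [PySem.Chars.splitOn] using this

-- B's char fold over l ++ [sep] processes exactly the alleles splitAux produces
lemma charfold (sep : Char) :
    ∀ (l cur : List Char) (c : Nat × Nat × Nat × Option String × Nat),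
      (l ++ [sep]).foldl (gt2zygStep sep) (c, cur) =
        ((splitAux sep l cur).foldl (fun s cs => gt2zygPA s (String.ofList cs)) c, []) := by
  intro l
  induction l with
  | nil =>
    intro cur c
    simp [gt2zygStep, splitAux]
  | cons a rest ih =>
    intro cur c
    by_cases ha : a = sep
    · simp only [List.cons_append, List.foldl_cons]
      rw [show gt2zygStep sep (c, cur) a = (gt2zygPA c (String.ofList cur), []) from by
        simp [gt2zygStep, ha]]
      rw [ih]
      simp [splitAux, ha]
    · simp only [List.cons_append, List.foldl_cons]
      rw [show gt2zygStep sep (c, cur) a = (c, cur ++ [a]) from by simp [gt2zygStep, ha]]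
      rw [ih]
      have ha' : a ≠ sep := ha
      simp [splitAux, ha']

-- once `first` is set (to a non-'.' allele), the counter fold is plain counting
lemma fold_some (f : String) (hf : f ≠ ".") :
    ∀ (l : List String) (nA nD nZ nF : Nat),
      l.foldl gt2zygPA (nA, nD, nZ, some f, nF) =
        (nA + l.length, nD + l.count ".", nZ + l.count "0", some f, nF + l.count f) := by
  intro l
  induction l with
  | nil => intro nA nD nZ nF; simp
  | cons a t ih =>
    intro nA nD nZ nF
    simp only [List.foldl_cons, List.count_cons, List.length_cons]
    by_cases ha : a = "."
    · subst ha
      rw [show gt2zygPA (nA, nD, nZ, some f, nF) "." = (nA + 1, nD + 1, nZ, some f, nF) from by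
        simp [gt2zygPA]]
      rw [ih]
      have h0 : (("." : String) == "0") = false := by decide
      have hfb : (("." : String) == f) = false := by simpa using fun h => hf h.symm
      simp only [h0, hfb, beq_self_eq_true, if_true, Bool.false_eq_true, if_false,
        Prod.mk.injEq]
      and_intros <;> first | trivial | omega | (split_ifs <;> omega)
    · rw [show gt2zygPA (nA, nD, nZ, some f, nF) a =
          (nA + 1, nD, (if a == "0" then nZ + 1 else nZ), some f,
            (if a == f then nF + 1 else nF)) from by simp [gt2zygPA, ha]]
      rw [ih]
      have hd : ((a : String) == ".") = false := by simpa using ha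
      simp only [hd, Bool.false_eq_true, if_false, Prod.mk.injEq]
      and_intros <;> first | trivial | omega | (split_ifs <;> omega)

-- closed form of the whole counter fold
lemma fold_none :
    ∀ (l : List String) (nA nD nZ nF : Nat),
      l.foldl gt2zygPA (nA, nD, nZ, none, nF) =
        (nA + l.length, nD + l.count ".", nZ + l.count "0",
         (l.filter (fun x => x != ".")).head?,
         nF + ((l.filter (fun x => x != ".")).head?.elim 0
            (fun f => (l.filter (fun x => x != ".")).count f))) := by
  intro l
  induction l with
  | nil => intro nA nD nZ nF; simp
  | cons a t ih =>
    intro nA nD nZ nF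
    simp only [List.foldl_cons, List.count_cons, List.length_cons, List.filter_cons]
    by_cases ha : a = "."
    · subst ha
      rw [show gt2zygPA (nA, nD, nZ, none, nF) "." = (nA + 1, nD + 1, nZ, none, nF) from by
        simp [gt2zygPA]]
      rw [if_neg (show ¬ (((("." : String)) != ".") = true) from by simp)]
      rw [ih]
      have h0 : (("." : String) == "0") = false := by decide
      have h1 : (("." : String) == ".") = true := by decide
      simp only [h0, h1, if_true, Bool.false_eq_true, if_false, Prod.mk.injEq]
      and_intros <;> first | trivial | omega
    · rw [show gt2zygPA (nA, nD, nZ, none, nF) a =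
          (nA + 1, nD, (if a == "0" then nZ + 1 else nZ), some a, nF + 1) from by
        simp [gt2zygPA, ha]]
      have hne' : (a != ".") = true := by simpa using ha
      rw [if_pos hne']
      rw [fold_some a ha]
      have hd : ((a : String) == ".") = false := by simpa using ha
      have hcnt : (t.filter (fun x => x != ".")).count a = t.count a :=
        List.count_filter (by simpa using ha)
      simp only [List.head?_cons, hd, Bool.false_eq_true, if_false, Option.elim_some,
        List.count_cons, hcnt, beq_self_eq_true, if_true, Prod.mk.injEq]
      and_intros <;> first | trivial | omega | (split_ifs <;> omega)

-- two distinct values cannot jointly occur more often than the length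
lemma count_two_le (v w : String) (hvw : v ≠ w) :
    ∀ (l : List String), l.count v + l.count w ≤ l.length := by
  intro l
  induction l with
  | nil => simp
  | cons a t ih =>
    simp only [List.count_cons, List.length_cons]
    by_cases hv : a = v
    · have hv2 : (a == v) = true := by simpa using hv
      have hw : (a == w) = false := by simpa using fun h => hvw (hv ▸ h)
      simp only [hv2, if_true, hw, Bool.false_eq_true, if_false]
      omega
    · have hv' : (a == v) = false := by simpa using hv
      simp only [hv', Bool.false_eq_true, if_false]
      split_ifs <;> omega

-- counting two distinct values saturates the length iff every element is one of them
lemma count_two (v w : String) (hvw : v ≠ w) :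
    ∀ (l : List String), (l.count v + l.count w = l.length) ↔ ∀ x ∈ l, x = v ∨ x = w := by
  intro l
  induction l with
  | nil => simp
  | cons a t ih =>
    simp only [List.count_cons, List.length_cons, List.mem_cons]
    have hv := List.count_le_length (a := v) (l := t)
    have hw := List.count_le_length (a := w) (l := t)
    constructor
    · intro h
      by_cases hav : a = v
      · subst hav
        have hwa : (a == w) = false := by simpa using hvw
        simp only [beq_self_eq_true, if_true, hwa, Bool.false_eq_true, if_false] at h
        intro x hx
        rcases hx with rfl | hx
        · exact Or.inl rfl
        · exact (ih.mp (by omega)) x hx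
      · by_cases haw : a = w
        · subst haw
          have hva : (a == v) = false := by simpa using fun h' => hvw h'.symm
          simp only [beq_self_eq_true, if_true, hva, Bool.false_eq_true, if_false] at h
          intro x hx
          rcases hx with rfl | hx
          · exact Or.inr rfl
          · exact (ih.mp (by omega)) x hx
        · have h1 : (a == v) = false := by simpa using hav
          have h2 : (a == w) = false := by simpa using haw
          simp only [h1, h2, Bool.false_eq_true, if_false] at h
          have hle := count_two_le v w hvw t
          omega
    · intro h
      have ht : t.count v + t.count w = t.length := ih.mpr (fun x hx => h x (Or.inr hx))
      rcases h a (Or.inl rfl) with rfl | rfl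
      · have hwa : (a == w) = false := by simpa using hvw
        simp only [beq_self_eq_true, if_true, hwa, Bool.false_eq_true, if_false]; omega
      · have hva : (a == v) = false := by simpa using fun h' => hvw h'.symm
        simp only [beq_self_eq_true, if_true, hva, Bool.false_eq_true, if_false]; omega

-- set(l) == {v}  ↔  l is nonempty and every element is v
lemma set_equal_singleton_iff (l : List String) (v : String) :
    PySem.Set.equal (PySem.Set.ofList l) (PySem.Set.ofList [v]) = true ↔
      (l ≠ [] ∧ ∀ x ∈ l, x = v) := by
  rw [PySem.Set.equal_iff]
  constructor
  · intro h
    have hv : v ∈ PySem.Set.ofList l := by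
      rw [h v]; simp [PySem.Set.mem_ofList]
    rw [PySem.Set.mem_ofList] at hv
    refine ⟨by rintro rfl; simp at hv, ?_⟩
    intro x hx
    have := (h x).mp (by rw [PySem.Set.mem_ofList]; exact hx)
    rw [PySem.Set.mem_ofList] at this; simpa using this
  · rintro ⟨hne, hall⟩ x
    rw [PySem.Set.mem_ofList, PySem.Set.mem_ofList]
    constructor
    · intro hx; simp [hall x hx]
    · intro hx
      simp only [List.mem_singleton] at hx
      subst hx
      cases l with
      | nil => exact absurd rfl hne
      | cons a t => have := hall a (by simp); simp [← this]

-- len(set(a :: rest)) == 1  ↔  every element of rest equals a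
lemma len_ofList_cons_eq_one_iff (a : String) (rest : List String) :
    (PySem.Set.len (PySem.Set.ofList (a :: rest)) = 1) ↔ ∀ x ∈ rest, x = a := by
  have hm : ∀ x, x ∈ PySem.Set.ofList (a :: rest) ↔ x ∈ a :: rest :=
    fun x => PySem.Set.mem_ofList _ _
  have hnd : (PySem.Set.ofList (a :: rest)).Nodup := PySem.Set.nodup_ofList _
  constructor
  · intro h
    have hlen : (PySem.Set.ofList (a :: rest)).length = 1 := by
      simp only [PySem.Set.len] at h; exact_mod_cast h
    obtain ⟨b, hb⟩ := List.length_eq_one_iff.mp hlen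
    have ha : a ∈ PySem.Set.ofList (a :: rest) := (hm a).mpr (by simp)
    rw [hb] at ha hm
    simp only [List.mem_singleton] at ha
    subst ha
    intro x hx
    have := ((hm x).mpr (by simp [hx]))
    simpa using this
  · intro hall
    have : PySem.Set.ofList (a :: rest) = [a] := by
      cases hs : PySem.Set.ofList (a :: rest) with
      | nil =>
        have := (hm a).mpr (by simp); rw [hs] at this; simp at this
      | cons c t =>
        have hc : c = a := by
          have := (hm c).mp (by simp [hs])
          rcases List.mem_cons.mp this with h | h
          · exact h
          · exact hall c h
        subst hc
        have ht : t = [] := by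
          cases t with
          | nil => rfl
          | cons d u =>
            have hd : d = c := by
              have := (hm d).mp (by simp [hs])
              rcases List.mem_cons.mp this with h | h
              · exact h
              · exact hall d h
            rw [hs] at hnd
            simp [hd] at hnd
        rw [ht]
    simp [PySem.Set.len, this]

-- A's set classification of a nonempty allele list equals B's counter finalization
lemma core_eq (dat : List String) (hne : dat ≠ []) :
    (if PySem.Set.equal (PySem.Set.ofList dat) (PySem.Set.ofList ["."]) then ((0 : Int), (0 : Int))
     else
       let datClean := dat.filter (fun x => x != ".")
       if PySem.Set.equal (PySem.Set.ofList datClean) (PySem.Set.ofList ["0"]) then (2, 0)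
       else ((if PySem.Set.len (PySem.Set.ofList datClean) = 1 then 2 else 1), 1)) =
    (match dat.foldl gt2zygPA (0, 0, 0, none, 0) with
     | (nA, nD, nZ, _, nF) =>
       if nD = nA then ((0 : Int), (0 : Int))
       else if nZ + nD = nA then (2, 0)
       else ((if nF + nD = nA then 2 else 1), 1)) := by
  rw [fold_none]
  cases hfil : dat.filter (fun x => x != ".") with
  | nil =>
    have hall : ∀ x ∈ dat, x = "." := by
      intro x hx
      by_contra hx'
      have : x ∈ dat.filter (fun y => y != ".") :=
        List.mem_filter.mpr ⟨hx, by simpa using hx'⟩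
      simp [hfil] at this
    rw [if_pos ((set_equal_singleton_iff dat ".").mpr ⟨hne, hall⟩)]
    have hcnt : dat.count "." = dat.length :=
      List.count_eq_length.mpr (fun b hb => (hall b hb).symm)
    simp [hcnt]
  | cons f rest =>
    simp only [List.head?_cons, Option.elim_some]
    have hfmem : f ∈ dat ∧ (f != ".") = true :=
      List.mem_filter.mp (hfil ▸ List.mem_cons_self (l := rest))
    have hfdot : f ≠ "." := by simpa using hfmem.2
    have hclean : ∀ x, x ∈ f :: rest ↔ (x ∈ dat ∧ x ≠ ".") := by
      intro x
      rw [← hfil]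
      constructor
      · intro hx
        have h := List.mem_filter.mp hx
        exact ⟨h.1, by simpa using h.2⟩
      · intro ⟨h1, h2⟩
        exact List.mem_filter.mpr ⟨h1, by simpa using h2⟩
    have hnotall : ¬ (dat ≠ [] ∧ ∀ x ∈ dat, x = ".") := by
      rintro ⟨-, hall⟩; exact hfdot (hall f hfmem.1)
    have hcntdotne : ¬ (dat.count "." = dat.length) := by
      intro h
      exact hfdot (((List.count_eq_length).mp h) f hfmem.1).symm
    rw [if_neg (show ¬ (PySem.Set.equal (PySem.Set.ofList dat)
        (PySem.Set.ofList ["."]) = true) from by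
      rw [set_equal_singleton_iff]; exact hnotall)]
    rw [if_neg (show ¬ ((0 : Nat) + dat.count "." = 0 + dat.length) from
      fun h => hcntdotne (by omega))]
    have hzero_iff : (dat.count "0" + dat.count "." = dat.length) ↔
        ∀ x ∈ f :: rest, x = "0" := by
      rw [count_two "0" "." (by decide) dat]
      constructor
      · intro h x hx
        have hx' := (hclean x).mp hx
        rcases h x hx'.1 with h' | h'
        · exact h'
        · exact absurd h' hx'.2
      · intro h x hx
        by_cases hxd : x = "."
        · exact Or.inr hxd
        · exact Or.inl (h x ((hclean x).mpr ⟨hx, hxd⟩))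
    by_cases hz : ∀ x ∈ f :: rest, x = "0"
    · rw [if_pos ((set_equal_singleton_iff (f :: rest) "0").mpr ⟨by simp, hz⟩)]
      rw [if_pos (show (0 : Nat) + dat.count "0" + (0 + dat.count ".") = 0 + dat.length from by
        have := hzero_iff.mpr hz; omega)]
    · rw [if_neg (show ¬ (PySem.Set.equal (PySem.Set.ofList (f :: rest))
          (PySem.Set.ofList ["0"]) = true) from by
        rw [set_equal_singleton_iff]; rintro ⟨-, h⟩; exact hz h)]
      rw [if_neg (show ¬ ((0 : Nat) + dat.count "0" + (0 + dat.count ".") = 0 + dat.length) from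
        fun h => hz (hzero_iff.mp (by omega)))]
      have hcnt_f : (f :: rest).count f = dat.count f := by
        rw [← hfil]; exact List.count_filter (by simpa using hfdot)
      have hsame_iff : (dat.count f + dat.count "." = dat.length) ↔ ∀ x ∈ rest, x = f := by
        rw [count_two f "." hfdot dat]
        constructor
        · intro h x hx
          have hx' := (hclean x).mp (List.mem_cons_of_mem f hx)
          rcases h x hx'.1 with h' | h'
          · exact h'
          · exact absurd h' hx'.2
        · intro h x hx
          by_cases hxd : x = "."
          · exact Or.inr hxd
          · have hx' := (hclean x).mpr ⟨hx, hxd⟩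
            rcases List.mem_cons.mp hx' with h' | h'
            · exact Or.inl h'
            · exact Or.inl (h x h')
      by_cases hs : ∀ x ∈ rest, x = f
      · rw [if_pos ((len_ofList_cons_eq_one_iff f rest).mpr hs)]
        rw [if_pos (show (0 : Nat) + (f :: rest).count f + (0 + dat.count ".") = 0 + dat.length from by
          have h1 := hcnt_f
          have h2 := hsame_iff.mpr hs
          omega)]
      · rw [if_neg (fun h => hs ((len_ofList_cons_eq_one_iff f rest).mp h))]
        rw [if_neg (show ¬ ((0 : Nat) + (f :: rest).count f + (0 + dat.count ".") = 0 + dat.length) from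
          fun h => hs (hsame_iff.mp (by have h1 := hcnt_f; omega)))]

-- ===== VERDICT (by name: the statement is the Claim_ definition above) =====
theorem gt2zyg_spec : Claim_equal_gt2zyg := by
  intro gt _
  unfold Spec_gt2zyg gt2zyg gt2zyg_alt
  by_cases hin : PySem.Str.isIn "/" gt = true
  · simp only [hin, if_true]
    rw [show PySem.Str.split? gt "/" =
        some ((PySem.Chars.splitOn gt.toList ['/']).map String.ofList) from by
      simp [PySem.Str.split?, PySem.Chars.split?]]
    rw [Option.getD_some, splitOn_single]
    rw [charfold '/' gt.toList [] (0, 0, 0, none, 0)]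
    rw [core_eq _ (by simp [splitAux_ne_nil])]
    rw [List.foldl_map]
  · have hf : PySem.Str.isIn "/" gt = false := by simpa using hin
    simp only [hf, Bool.false_eq_true, if_false]
    rw [show PySem.Str.split? gt "|" =
        some ((PySem.Chars.splitOn gt.toList ['|']).map String.ofList) from by
      simp [PySem.Str.split?, PySem.Chars.split?]]
    rw [Option.getD_some, splitOn_single]
    rw [charfold '|' gt.toList [] (0, 0, 0, none, 0)]
    rw [core_eq _ (by simp [splitAux_ne_nil])]
    rw [List.foldl_map]
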